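-- pv_equiv track=rewrite | github.com/mintaprapy/cross_market_arbitrage | cross_market_monitor/application/common.py | infer_product_code
-- ===== SOURCE A (Python) =====
-- def infer_product_code(symbol: str) -> str | None:
--     mapping = {
--         "nf_AU0": "au",
--         "nf_AG0": "ag",
--         "nf_CU0": "cu",
--         "nf_BC0": "bc",
--         "nf_SC0": "sc",
--     }
--     if symbol in mapping:
--         return mapping[symbol]
--     stripped = symbol.replace("nf_", "")
--     letters = "".join(ch for ch in stripped if ch.isalpha())
--     return letters.lower() or None
-- ===== SOURCE B (Python) =====
-- def infer_product_code(symbol: str) -> str | None: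
--     code = "".join(ch.lower() for ch in symbol.replace("nf_", "") if ch.isalpha())
--     return code or None
-- ===== Notes on version B (the rewrite author's own statement) =====
-- stated objective: simpler
-- what changed: Dropped the five-entry mapping dict and its membership branch (each value equals what the fallback computes) and fused the filter+lower passes into one comprehension that lowercases each alphabetic character directly.
import Mathlib
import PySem

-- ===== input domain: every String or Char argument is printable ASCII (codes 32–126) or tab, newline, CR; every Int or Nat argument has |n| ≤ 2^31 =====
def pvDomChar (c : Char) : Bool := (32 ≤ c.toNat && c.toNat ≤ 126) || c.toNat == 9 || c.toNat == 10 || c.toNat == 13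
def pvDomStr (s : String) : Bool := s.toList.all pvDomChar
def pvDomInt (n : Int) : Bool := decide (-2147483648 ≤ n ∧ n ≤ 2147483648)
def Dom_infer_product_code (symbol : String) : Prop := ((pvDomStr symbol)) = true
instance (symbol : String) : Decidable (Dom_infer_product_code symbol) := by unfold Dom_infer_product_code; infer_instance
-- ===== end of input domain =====

-- B drops the redundant five-entry mapping dict (each value equals the fallback's result)
-- and fuses the filter and lower passes into one comprehension; objective: simpler, not faster.

-- ===== PORT A =====
def infer_product_code (symbol : String) : Option String :=
  let mapping : PySem.Dict String String :=
    ((((PySem.Dict.empty.insert "nf_AU0" "au").insert "nf_AG0" "ag").insert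
        "nf_CU0" "cu").insert "nf_BC0" "bc").insert "nf_SC0" "sc"
  if mapping.contains symbol then
    some (mapping.getD symbol "")
  else
    let stripped := PySem.Str.replace symbol "nf_" ""
    let letters := String.ofList (stripped.toList.filter PySem.Chars.isalpha)
    let lowered := PySem.Str.lower letters
    if lowered = "" then none else some lowered

-- ===== PORT B =====
def infer_product_code_alt (symbol : String) : Option String :=
  let code := String.ofList ((PySem.Str.replace symbol "nf_" "").toList.filterMap
    (fun ch => if PySem.Chars.isalpha ch then some (PySem.Chars.lowerChar ch) else none))
  if code = "" then none else some code

-- ===== PRECONDITION & SPEC =====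
def Spec_infer_product_code (symbol : String) (out : Option String) : Prop := out = infer_product_code_alt symbol
instance (symbol : String) (out : Option String) : Decidable (Spec_infer_product_code symbol out) := by unfold Spec_infer_product_code; infer_instance

-- ===== CLAIM (what is proved, stated in full; the proofs are below) =====
def Claim_equal_infer_product_code : Prop := ∀ (symbol : String), Dom_infer_product_code symbol → Spec_infer_product_code symbol (infer_product_code symbol)

-- ===== LEMMAS AND PROOFS =====

-- lower-after-filter equals the fused filterMap
theorem lower_filter_eq_filterMap (l : List Char) :
    PySem.Chars.lower (l.filter PySem.Chars.isalpha) =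
      l.filterMap (fun ch => if PySem.Chars.isalpha ch then some (PySem.Chars.lowerChar ch) else none) := by
  induction l with
  | nil => rfl
  | cons c cs ih =>
    by_cases h : PySem.Chars.isalpha c
    · simp [h, PySem.Chars.lower] at *
      simpa [PySem.Chars.lower] using ih
    · simp [h, PySem.Chars.lower] at *
      simpa [PySem.Chars.lower] using ih

theorem fallback_eq (symbol : String) :
    (let stripped := PySem.Str.replace symbol "nf_" ""
     let letters := String.ofList (stripped.toList.filter PySem.Chars.isalpha)
     let lowered := PySem.Str.lower letters
     if lowered = "" then none else some lowered) = infer_product_code_alt symbol := by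
  simp only [infer_product_code_alt, PySem.Str.lower]
  rw [String.toList_ofList, lower_filter_eq_filterMap]

-- ===== VERDICT (by name: the statement is the Claim_ definition above) =====
theorem infer_product_code_spec : Claim_equal_infer_product_code := by
  intro symbol _
  show infer_product_code symbol = infer_product_code_alt symbol
  by_cases h1 : symbol = "nf_AU0"; · subst h1; decide
  by_cases h2 : symbol = "nf_AG0"; · subst h2; decide
  by_cases h3 : symbol = "nf_CU0"; · subst h3; decide
  by_cases h4 : symbol = "nf_BC0"; · subst h4; decide
  by_cases h5 : symbol = "nf_SC0"; · subst h5; decide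
  have hc : (((((PySem.Dict.empty.insert "nf_AU0" "au").insert "nf_AG0" "ag").insert
      "nf_CU0" "cu").insert "nf_BC0" "bc").insert "nf_SC0" "sc" :
      PySem.Dict String String).contains symbol = false := by
    simp [PySem.Dict.contains_insert, PySem.Dict.contains_empty, h1, h2, h3, h4, h5]
  simp only [infer_product_code, hc, if_false, Bool.false_eq_true]
  exact fallback_eq symbol
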